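-- pv_equiv track=rewrite | github.com/christopheprudent/python-exercices | dict/e036_dict_from_lists.py | create_dict_from_lists
-- ===== SOURCE A (Python) =====
-- import collections
--
-- def create_dict_from_lists(l1, l2, sol = 'mine'):
--     d = collections.defaultdict(set)
--     for k,v in zip(l1, l2):
--         if sol == 'mine':
--             d[k] = d[k].union({v})
--         else:
--             d[k].add(v)
--
--     return d
-- ===== SOURCE B (Python) =====
-- import collections
--
-- def create_dict_from_lists(l1, l2, sol='mine'):
--     grouped = collections.defaultdict(list)
--     for k, v in zip(l1, l2):
--         grouped[k].append(v)
--     result = collections.defaultdict(set)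
--     for k, values in grouped.items():
--         result[k] = set(values)
--     return result
-- ===== Notes on version B (the rewrite author's own statement) =====
-- stated objective: alternative
-- what changed: B ignores the inert sol flag and groups in two passes: first it accumulates all paired values per key into lists with defaultdict(list).append, then a second pass converts each list to a set; A instead maintains sets incrementally, re-unioning/adding one element per iteration.
import Mathlib
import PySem

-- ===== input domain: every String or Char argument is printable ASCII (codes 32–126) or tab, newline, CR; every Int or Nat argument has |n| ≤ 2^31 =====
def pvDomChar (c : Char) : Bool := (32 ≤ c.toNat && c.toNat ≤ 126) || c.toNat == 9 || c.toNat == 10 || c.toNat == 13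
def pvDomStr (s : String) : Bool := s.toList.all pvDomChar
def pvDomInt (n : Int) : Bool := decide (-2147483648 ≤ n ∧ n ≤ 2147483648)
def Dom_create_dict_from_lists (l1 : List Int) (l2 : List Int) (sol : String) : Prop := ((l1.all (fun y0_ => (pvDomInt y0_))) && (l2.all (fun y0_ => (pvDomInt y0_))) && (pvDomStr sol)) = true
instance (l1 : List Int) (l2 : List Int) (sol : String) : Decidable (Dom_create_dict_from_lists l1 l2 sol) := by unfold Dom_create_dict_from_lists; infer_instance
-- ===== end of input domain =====

-- B replaces A's incremental per-element set maintenance by a two-pass decomposition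
-- (group values per key into lists, then convert each list to a set); same cost, no speed claim.

-- ===== PORT A =====
def create_dict_from_lists (l1 : List Int) (l2 : List Int) (sol : String) : List (Int × List Int) :=
  ((l1.zip l2).foldl (fun d kv =>
      if sol == "mine" then
        -- d[k] = d[k].union({v})
        d.insert kv.1 (PySem.Set.union (d.getD kv.1 PySem.Set.empty) (PySem.Set.ofList [kv.2]))
      else
        -- d[k].add(v)
        d.modify kv.1 PySem.Set.empty (fun s => PySem.Set.add s kv.2))
    (PySem.Dict.empty : PySem.Dict Int (PySem.Set Int))).items

-- ===== PORT B =====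
def create_dict_from_lists_alt (l1 : List Int) (l2 : List Int) (sol : String) : List (Int × List Int) :=
  let grouped := (l1.zip l2).foldl (fun d kv => d.modify kv.1 [] (fun vs => vs ++ [kv.2]))
    (PySem.Dict.empty : PySem.Dict Int (List Int))
  (grouped.items.foldl (fun d kv => d.insert kv.1 (PySem.Set.ofList kv.2))
    (PySem.Dict.empty : PySem.Dict Int (PySem.Set Int))).items

-- ===== PRECONDITION & SPEC =====
def Spec_create_dict_from_lists (l1 : List Int) (l2 : List Int) (sol : String) (out : List (Int × List Int)) : Prop := out = create_dict_from_lists_alt l1 l2 sol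
instance (l1 : List Int) (l2 : List Int) (sol : String) (out : List (Int × List Int)) : Decidable (Spec_create_dict_from_lists l1 l2 sol out) := by unfold Spec_create_dict_from_lists; infer_instance

-- ===== CLAIM (what is proved, stated in full; the proofs are below) =====
def Claim_equal_create_dict_from_lists : Prop := ∀ (l1 : List Int) (l2 : List Int) (sol : String), Dom_create_dict_from_lists l1 l2 sol → Spec_create_dict_from_lists l1 l2 sol (create_dict_from_lists l1 l2 sol)

-- ===== LEMMAS AND PROOFS =====

-- `pvSets d` applies B's second pass ("set(values)") to every entry of the intermediate dict.
def pvSets (d : PySem.Dict Int (List Int)) : PySem.Dict Int (PySem.Set Int) :=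
  PySem.Dict.mk (d.items.map (fun p => (p.1, PySem.Set.ofList p.2)))

theorem contains_pvSets (d : PySem.Dict Int (List Int)) (k : Int) :
    (pvSets d).contains k = d.contains k := by
  simp [pvSets, PySem.Dict.contains, List.any_map, Function.comp_def]

theorem keys_pvSets (d : PySem.Dict Int (List Int)) :
    (pvSets d).keys = d.keys := by
  simp [pvSets, PySem.Dict.keys, List.map_map, Function.comp]

theorem union_singleton (s : PySem.Set Int) (v : Int) :
    PySem.Set.union s (PySem.Set.ofList [v]) = PySem.Set.add s v := by
  simp [PySem.Set.union, PySem.Set.update, PySem.Set.ofList, PySem.Set.add,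
    PySem.Set.empty, PySem.Set.contains]

theorem ofList_append_singleton (l : List Int) (v : Int) :
    PySem.Set.ofList (l ++ [v]) = PySem.Set.add (PySem.Set.ofList l) v := by
  simp [PySem.Set.ofList, List.foldl_append]

theorem getD_pvSets (d : PySem.Dict Int (List Int)) (hn : d.keys.Nodup) (k : Int) :
    (pvSets d).getD k PySem.Set.empty = PySem.Set.ofList (d.getD k []) := by
  cases h : d.get? k with
  | none =>
      have hc : d.contains k = false := by
        have := (PySem.Dict.get?_eq_none_iff_contains (d := d) (k := k)).mp h
        simpa using this
      have hc' : (pvSets d).contains k = false := by rw [contains_pvSets]; exact hc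
      rw [PySem.Dict.getD_of_not_contains d [] hc,
        PySem.Dict.getD_of_not_contains (pvSets d) PySem.Set.empty hc']
      rfl
  | some v =>
      have hmem : (k, v) ∈ d.items := PySem.Dict.mem_items_of_get?_eq_some d h
      have hmem' : (k, PySem.Set.ofList v) ∈ (pvSets d).items := by
        simp only [pvSets]
        exact List.mem_map.mpr ⟨(k, v), hmem, rfl⟩
      have hn' : (pvSets d).keys.Nodup := by rw [keys_pvSets]; exact hn
      rw [PySem.Dict.getD_of_mem_items _ hmem' hn', PySem.Dict.getD_of_mem_items _ hmem hn]

theorem insert_pvSets (d : PySem.Dict Int (List Int)) (k : Int) (l : List Int) :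
    (pvSets d).insert k (PySem.Set.ofList l) = pvSets (d.insert k l) := by
  simp only [PySem.Dict.insert, contains_pvSets]
  by_cases hc : d.contains k = true
  · rw [if_pos hc, if_pos hc]
    simp only [pvSets, List.map_map]
    congr 1
    apply List.map_congr_left
    intro p _
    by_cases hpk : p.1 = k <;> simp [hpk]
  · rw [if_neg hc, if_neg hc]
    simp [pvSets]

theorem step_pvSets (d : PySem.Dict Int (List Int)) (hn : d.keys.Nodup) (k v : Int) :
    (pvSets d).insert k (PySem.Set.add ((pvSets d).getD k PySem.Set.empty) v)
      = pvSets (d.modify k [] (fun vs => vs ++ [v])) := by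
  rw [getD_pvSets d hn, ← ofList_append_singleton]
  exact insert_pvSets d k _

theorem nodup_keys_insert' (d : PySem.Dict Int (List Int)) (hn : d.keys.Nodup) (k : Int) (l : List Int) :
    (d.insert k l).keys.Nodup := PySem.Dict.nodup_keys_insert d k l hn

theorem loop_pvSets (zs : List (Int × Int)) (sol : String) :
    ∀ (d : PySem.Dict Int (List Int)), d.keys.Nodup →
      zs.foldl (fun d kv =>
          if sol == "mine" then
            d.insert kv.1 (PySem.Set.union (d.getD kv.1 PySem.Set.empty) (PySem.Set.ofList [kv.2]))
          else
            d.modify kv.1 PySem.Set.empty (fun s => PySem.Set.add s kv.2)) (pvSets d)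
        = pvSets (zs.foldl (fun d kv => d.modify kv.1 [] (fun vs => vs ++ [kv.2])) d) := by
  induction zs with
  | nil => intro d _; rfl
  | cons kv rest ih =>
      intro d hn
      have hstep : (if sol == "mine" then
            (pvSets d).insert kv.1 (PySem.Set.union ((pvSets d).getD kv.1 PySem.Set.empty) (PySem.Set.ofList [kv.2]))
          else
            (pvSets d).modify kv.1 PySem.Set.empty (fun s => PySem.Set.add s kv.2))
          = pvSets (d.modify kv.1 [] (fun vs => vs ++ [kv.2])) := by
        by_cases hs : (sol == "mine") = true
        · rw [if_pos hs, union_singleton]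
          exact step_pvSets d hn kv.1 kv.2
        · rw [if_neg hs]
          show (pvSets d).insert kv.1 (PySem.Set.add ((pvSets d).getD kv.1 PySem.Set.empty) kv.2) = _
          exact step_pvSets d hn kv.1 kv.2
      simp only [List.foldl_cons, hstep]
      exact ih _ (nodup_keys_insert' d hn kv.1 _)

theorem second_pass (g : PySem.Dict Int (List Int)) (hn : g.keys.Nodup) :
    (g.items.foldl (fun d kv => d.insert kv.1 (PySem.Set.ofList kv.2))
      (PySem.Dict.empty : PySem.Dict Int (PySem.Set Int))).items = (pvSets g).items := by
  have hfresh : ∀ p ∈ g.items, (PySem.Dict.empty : PySem.Dict Int (PySem.Set Int)).contains p.1 = false := by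
    intro p _; simp [PySem.Dict.contains, PySem.Dict.empty]
  have hnd : (g.items.map (fun p : Int × List Int => p.1)).Nodup := hn
  rw [PySem.Dict.items_foldl_insert_fresh g.items (fun p => p.1) (fun p => PySem.Set.ofList p.2)
    PySem.Dict.empty hfresh hnd]
  rfl

-- ===== VERDICT (by name: the statement is the Claim_ definition above) =====
theorem create_dict_from_lists_spec : Claim_equal_create_dict_from_lists := by
  intro l1 l2 sol _
  show create_dict_from_lists l1 l2 sol = create_dict_from_lists_alt l1 l2 sol
  unfold create_dict_from_lists create_dict_from_lists_alt
  have hempty : (PySem.Dict.empty : PySem.Dict Int (PySem.Set Int)) = pvSets PySem.Dict.empty := rfl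
  conv_lhs => rw [hempty, loop_pvSets (l1.zip l2) sol PySem.Dict.empty (by simp [PySem.Dict.keys, PySem.Dict.empty])]
  exact (second_pass _ (by
    apply PySem.Dict.nodup_keys_foldl_insert_key
    simp [PySem.Dict.keys, PySem.Dict.empty])).symm
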